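-- pv_equiv track=rewrite | github.com/smiks/CoolTools | cooltools.py | is_signed_perm
-- ===== SOURCE A (Python) =====
-- from collections import Counter, defaultdict
--
-- def is_signed_perm(lst):
--     """
--     Checks if given list (lst) is signed permutation.
--     Eg.
--     [5, 4, 3, 1] => False (missing 2)
--     [1, 1, 2, 3] => False (1 appears twice)
--     [1, 2, -3, 4] => True
--     [1, 2, 3, 4, 5] => True
--     Return: Boolean,
--     True if lst represents signed permutation, otherwise False
--     """
--     dd = defaultdict(int)
--     abslst = list(map(lambda x: abs(x), lst))
--     llst = len(abslst)
--     for i in abslst: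
--         dd[i] += 1
--         if dd[i] > 1:
--             return False
--     if llst != max(abslst):
--         return False
--     return True
-- ===== SOURCE B (Python) =====
-- def is_signed_perm(lst):
--     abslst = [abs(x) for x in lst]
--     m = max(abslst)  # ValueError on empty input, exactly as A
--     s = sorted(abslst)
--     for x, y in zip(s, s[1:]):
--         if x == y:
--             return False
--     return len(abslst) == m
-- ===== Notes on version B (the rewrite author's own statement) =====
-- stated objective: alternative
-- what changed: Replaces A's incremental dict-counter duplicate detection with a sort-then-adjacent-scan duplicate test, computing max first so the empty-list ValueError is preserved.
import Mathlib
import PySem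

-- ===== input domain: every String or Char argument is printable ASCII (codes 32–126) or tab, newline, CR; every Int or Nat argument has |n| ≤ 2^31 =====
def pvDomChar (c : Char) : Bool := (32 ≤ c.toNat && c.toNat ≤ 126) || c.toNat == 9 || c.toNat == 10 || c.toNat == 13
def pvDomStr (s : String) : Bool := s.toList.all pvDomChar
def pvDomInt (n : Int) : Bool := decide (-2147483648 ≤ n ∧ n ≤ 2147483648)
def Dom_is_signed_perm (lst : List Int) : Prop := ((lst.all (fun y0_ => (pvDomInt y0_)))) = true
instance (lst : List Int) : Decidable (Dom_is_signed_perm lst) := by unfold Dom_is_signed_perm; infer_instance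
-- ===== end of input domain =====

-- B replaces A's dict-counter duplicate test by a sort + adjacent-pair scan (alternative algorithm; return value only).

-- ===== PORT A =====
-- the for-loop over abslst with the defaultdict counter; early `return False` on a count > 1,
-- otherwise falls through to the `llst != max(abslst)` check (max of [] = none → outside Pre_)
def is_signed_perm_go (d : PySem.Dict Int Int) (llst : Int) (abslst : List Int) :
    List Int → Bool
  | [] =>
      match PySem.List.max? abslst (fun x => x) with
      | none => false          -- Python raises ValueError here; excluded by Pre_
      | some m => !(llst != m)
  | i :: t =>
      let d' := d.insert i (d.getD i 0 + 1)
      if d'.getD i 0 > 1 then false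
      else is_signed_perm_go d' llst abslst t

def is_signed_perm (lst : List Int) : Bool :=
  let abslst := lst.map (fun x => |x|)
  let llst : Int := abslst.length
  is_signed_perm_go (PySem.Dict.empty (κ := Int) (ν := Int)) llst abslst abslst

-- ===== PORT B =====
-- the `for x, y in zip(s, s[1:])` adjacent scan with early `return False`
def is_signed_perm_scan : List (Int × Int) → Option Bool
  | [] => none
  | (x, y) :: t => if x == y then some false else is_signed_perm_scan t

def is_signed_perm_alt (lst : List Int) : Bool :=
  let abslst := lst.map (fun x => |x|)
  match PySem.List.max? abslst (fun x => x) with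
  | none => false              -- Python raises ValueError here; excluded by Pre_
  | some m =>
      let s := PySem.List.sorted abslst (fun x => x) false
      match is_signed_perm_scan (s.zip (PySem.List.slice s (some 1) none)) with
      | some b => b
      | none => (abslst.length : Int) == m

-- ===== PRECONDITION & SPEC =====
-- Pre_ excludes only the empty list, on which Python's max([]) raises ValueError in both A and B.
def Pre_is_signed_perm (lst : List Int) : Prop := lst ≠ []
instance (lst : List Int) : Decidable (Pre_is_signed_perm lst) := by unfold Pre_is_signed_perm; infer_instance
def pvWitness_is_signed_perm : List Int := [1, -2, 3]

def Spec_is_signed_perm (lst : List Int) (out : Bool) : Prop := out = is_signed_perm_alt lst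
instance (lst : List Int) (out : Bool) : Decidable (Spec_is_signed_perm lst out) := by unfold Spec_is_signed_perm; infer_instance

-- ===== CLAIM (what is proved, stated in full; the proofs are below) =====
def Claim_equal_is_signed_perm : Prop := ∀ (lst : List Int), Dom_is_signed_perm lst → Pre_is_signed_perm lst → Spec_is_signed_perm lst (is_signed_perm lst)

-- ===== LEMMAS AND PROOFS =====

-- A's loop with counts of a processed prefix p: returns false iff xs meets p or repeats, else the tail check.
theorem go_eq (llst : Int) (abslst : List Int) (xs : List Int) :
    ∀ (p : List Int) (d : PySem.Dict Int Int), (∀ k, d.getD k 0 = p.count k) →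
    is_signed_perm_go d llst abslst xs =
      (if (∀ x ∈ xs, x ∉ p) ∧ xs.Nodup then
        (match PySem.List.max? abslst (fun x => x) with
         | none => false
         | some m => !(llst != m)) else false) := by
  induction xs with
  | nil => intro p d h; simp [is_signed_perm_go]
  | cons i t ih =>
      intro p d h
      simp only [is_signed_perm_go]
      rw [PySem.Dict.getD_insert, if_pos rfl]
      simp only [h i]
      by_cases hip : i ∈ p
      · have : p.count i > 0 := List.count_pos_iff.mpr hip
        rw [if_pos (by omega)]
        rw [if_neg (by rintro ⟨hall, -⟩; exact hall i (by simp) hip)]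
      · have : p.count i = 0 := List.count_eq_zero.mpr hip
        rw [if_neg (by omega)]
        rw [ih (p ++ [i]) _ (by
          intro k
          rw [PySem.Dict.getD_insert, List.count_append, List.count_singleton, h k]
          by_cases hk : k = i
          · simp [hk]
          · simp [hk, Ne.symm hk])]
        congr 1
        simp only [List.mem_append, List.mem_singleton, List.nodup_cons, eq_iff_iff]
        constructor
        · rintro ⟨hall, hnd⟩
          refine ⟨?_, ?_, hnd⟩
          · intro x hx
            rcases List.mem_cons.mp hx with rfl | hx
            · exact hip
            · exact fun hxp => hall x hx (Or.inl hxp)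
          · exact fun hit => hall i hit (Or.inr rfl)
        · rintro ⟨hall, hit, hnd⟩
          exact ⟨fun x hx h =>
            h.elim (fun hxp => hall x (List.mem_cons_of_mem i hx) hxp)
              (fun hxi => hit (hxi ▸ hx)), hnd⟩

-- B's scan over the zipped sorted list: finds `some false` iff the sorted list has an adjacent equal pair
theorem scan_eq (s : List Int) :
    is_signed_perm_scan (s.zip (PySem.List.slice s (some 1) none)) =
      (if s.IsChain (· ≠ ·) then none else some false) := by
  rw [PySem.List.slice_from_one]
  induction s with
  | nil => simp [is_signed_perm_scan]
  | cons a t ih =>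
      cases t with
      | nil => simp [is_signed_perm_scan]
      | cons b u =>
          rw [List.tail_cons] at ih ⊢
          simp only [List.zip_cons_cons, is_signed_perm_scan, List.isChain_cons_cons]
          by_cases hab : a = b
          · simp [hab]
          · simpa [hab] using ih

-- a ≤-chained list with no adjacent equals is Nodup
theorem sorted_chain_nodup (s : List Int) (hp : s.Pairwise (· ≤ ·)) (hc : s.IsChain (· ≠ ·)) :
    s.Nodup := by
  induction s with
  | nil => exact List.nodup_nil
  | cons a t ih =>
      rw [List.pairwise_cons] at hp
      cases t with
      | nil => simp
      | cons b u =>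
          obtain ⟨hab, hc'⟩ := List.isChain_cons_cons.mp hc
          refine List.nodup_cons.mpr ⟨?_, ih hp.2 hc'⟩
          intro hat
          have haleb : a ≤ b := hp.1 b (by simp)
          rcases List.mem_cons.mp hat with h | h
          · exact hab h
          · have : b ≤ a := (List.pairwise_cons.mp hp.2).1 a h
            exact hab (le_antisymm haleb this)

-- both ports compute: Nodup of the |·|-image && length == max
theorem both_eq (lst : List Int) :
    is_signed_perm lst = is_signed_perm_alt lst := by
  unfold is_signed_perm is_signed_perm_alt
  set abslst := lst.map (fun x => |x|) with habs
  rw [go_eq (abslst.length : Int) abslst abslst [] _ (fun k => rfl)]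
  cases hmax : PySem.List.max? abslst (fun x => x) with
  | none => simp only [hmax]; split <;> rfl
  | some m =>
      simp only [hmax]
      rw [scan_eq]
      have hperm : (PySem.List.sorted abslst (fun x => x) false).Perm abslst :=
        PySem.List.sorted_perm abslst (fun x => x) false
      have hpw : (PySem.List.sorted abslst (fun x => x) false).Pairwise (· ≤ ·) :=
        PySem.List.sorted_pairwise abslst (fun x => x)
      by_cases hnd : abslst.Nodup
      · have hs : (PySem.List.sorted abslst (fun x => x) false).Nodup := hperm.nodup_iff.mpr hnd
        rw [if_pos ⟨by simp, hnd⟩, if_pos (List.Pairwise.isChain hs)]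
        simp [bne]
      · have hs : ¬ (PySem.List.sorted abslst (fun x => x) false).Nodup :=
          fun h => hnd (hperm.nodup_iff.mp h)
        rw [if_neg (by rintro ⟨-, h⟩; exact hnd h)]
        rw [if_neg (fun hc => hs (sorted_chain_nodup _ hpw hc))]

-- ===== VERDICT (by name: the statement is the Claim_ definition above) =====
theorem is_signed_perm_spec : Claim_equal_is_signed_perm := by
  intro lst _ _
  unfold Spec_is_signed_perm
  exact both_eq lst
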